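-- pv_equiv track=rewrite | github.com/lucken99/Qs | primeproduct.py | solve
-- ===== SOURCE A (Python) =====
-- def prime_gen(start, end):
-- 	ans = []
-- 	for i in range(start, end):
-- 		if i > 1:
-- 			for j in range(2, i):
-- 				if (i%j == 0):
-- 					break
-- 			else:
-- 				ans.append(i)
-- 	return ans
--
-- def solve(n):
-- 	a = prime_gen(0, n)
-- 	p = n
-- 	for i in range(1,len(a)):
-- 		for j in range(1,len(a)):
-- 			if a[i]*a[j] == p:
-- 				return True
-- 	return False
-- ===== SOURCE B (Python) =====
-- def _is_prime(k):
--     if k < 2: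
--         return False
--     d = 2
--     while d * d <= k:
--         if k % d == 0:
--             return False
--         d += 1
--     return True
--
-- def solve(n):
--     # n is a product of two primes > 2 iff it has an odd prime divisor p
--     # no greater than sqrt(n) whose cofactor n // p is an odd prime too.
--     p = 3
--     while p * p <= n:
--         if n % p == 0 and _is_prime(p) and _is_prime(n // p):
--             return True
--         p += 1
--     return False
-- ===== Notes on version B (the rewrite author's own statement) =====
-- stated objective: faster
-- what changed: Instead of listing every prime below n by trial division and scanning all pairs of listed primes for a product equal to n, B scans candidate divisors p from 3 up to sqrt(n) and, when p divides n, trial-division-tests p and n//p for primality.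
import Mathlib
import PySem

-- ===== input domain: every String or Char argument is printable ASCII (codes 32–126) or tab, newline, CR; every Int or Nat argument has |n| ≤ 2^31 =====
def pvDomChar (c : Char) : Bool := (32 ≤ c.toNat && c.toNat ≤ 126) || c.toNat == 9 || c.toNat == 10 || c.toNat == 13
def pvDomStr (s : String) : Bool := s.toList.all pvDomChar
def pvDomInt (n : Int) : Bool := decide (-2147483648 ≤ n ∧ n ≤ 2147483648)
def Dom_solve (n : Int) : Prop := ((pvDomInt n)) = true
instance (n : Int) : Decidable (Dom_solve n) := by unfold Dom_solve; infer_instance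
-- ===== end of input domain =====

-- B scans candidate divisors p of n up to sqrt(n) and tests p and n//p
-- for primality by trial division, instead of A's full quadratic prime listing
-- followed by a quadratic double scan over all pairs of listed primes.

-- termination helper for the while-loops of B (cited by decreasing_by)
theorem pvSqLeImpLe (d k : Int) (h : d * d ≤ k) : d ≤ k := by
  by_cases hd : d ≤ 0
  · have : (0:Int) ≤ d * d := mul_self_nonneg d
    omega
  · nlinarith

-- ===== PORT A =====
-- inner 'for j in range(2, i): if i % j == 0: break / else: append' —
-- the for-else appends i exactly when no j in range(2, i) divides i
def pgInner (i : Int) : Bool :=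
  (PySem.List.pyRange 2 i 1).all (fun j => !(PySem.Int.mod i j == 0))

def prime_gen (start «end» : Int) : List Int :=
  (PySem.List.pyRange start «end» 1).foldl
    (fun ans i => if i > 1 then (if pgInner i then ans ++ [i] else ans) else ans) []

-- indices i, j of the double loop are always in range, so pyGetD a · 0 = a[·]
def solve (n : Int) : Bool :=
  let a := prime_gen 0 n
  (PySem.List.pyRange 1 (a.length : Int) 1).any (fun i =>
    (PySem.List.pyRange 1 (a.length : Int) 1).any (fun j =>
      PySem.List.pyGetD a i 0 * PySem.List.pyGetD a j 0 == n))

-- ===== PORT B =====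
-- 'while d * d <= k: if k % d == 0: return False; d += 1'
def ipLoop (k d : Int) : Bool :=
  if d * d ≤ k then
    if PySem.Int.mod k d == 0 then false else ipLoop k (d + 1)
  else true
termination_by (k + 1 - d).toNat
decreasing_by
  have := pvSqLeImpLe d k (by assumption)
  omega

def is_prime (k : Int) : Bool :=
  if k < 2 then false else ipLoop k 2

-- 'while p * p <= n: if n % p == 0 and _is_prime(p) and _is_prime(n // p): return True; p += 1'
def opLoop (n p : Int) : Bool :=
  if p * p ≤ n then
    if PySem.Int.mod n p == 0 && is_prime p && is_prime (PySem.Int.floordiv n p) then true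
    else opLoop n (p + 1)
  else false
termination_by (n + 1 - p).toNat
decreasing_by
  have := pvSqLeImpLe p n (by assumption)
  omega

def solve_alt (n : Int) : Bool := opLoop n 3

-- ===== PRECONDITION & SPEC =====
def Spec_solve (n : Int) (out : Bool) : Prop := out = solve_alt n
instance (n : Int) (out : Bool) : Decidable (Spec_solve n out) := by unfold Spec_solve; infer_instance

-- ===== CLAIM (what is proved, stated in full; the proofs are below) =====
def Claim_equal_solve : Prop := ∀ (n : Int), Dom_solve n → Spec_solve n (solve n)

-- ===== LEMMAS AND PROOFS =====

-- the shared mathematical condition: n = p * q for primes p, q ≥ 3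
def IsPP (n : Int) : Prop :=
  ∃ p q : Int, 3 ≤ p ∧ 3 ≤ q ∧ Nat.Prime p.toNat ∧ Nat.Prime q.toNat ∧ p * q = n

-- ---- B-side characterisation ----

theorem ipLoop_iff (k d : Int) (hd : 2 ≤ d) :
    ipLoop k d = true ↔ ∀ e, d ≤ e → e * e ≤ k → PySem.Int.mod k e ≠ 0 := by
  generalize hm : (k + 1 - d).toNat = m
  induction m generalizing d with
  | zero =>
    have hkd : k < d := by omega
    rw [ipLoop, if_neg (by nlinarith)]
    simp only [true_iff]
    intro e he hek
    exfalso; nlinarith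
  | succ m ih =>
    rw [ipLoop]
    by_cases hdk : d * d ≤ k
    · rw [if_pos hdk]
      by_cases hmod : (PySem.Int.mod k d == 0) = true
      · rw [if_pos hmod]
        constructor
        · intro h; exact absurd h (by simp)
        · intro h; exact absurd (beq_iff_eq.mp hmod) (h d le_rfl hdk)
      · rw [if_neg hmod]
        have hdle : d ≤ k := pvSqLeImpLe d k hdk
        rw [ih (d + 1) (by omega) (by omega)]
        constructor
        · intro h e he hek
          rcases eq_or_lt_of_le he with rfl | hlt
          · exact fun hc => hmod (beq_iff_eq.mpr hc)
          · exact h e (by omega) hek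
        · intro h e he hek
          exact h e (by omega) hek
    · rw [if_neg hdk]
      simp only [true_iff]
      intro e he hek
      exfalso; nlinarith

-- 'no divisor e with e*e ≤ k' characterises primality
theorem pvNoDivSq_iff (k : Int) (hk : 2 ≤ k) :
    (∀ e : Int, 2 ≤ e → e * e ≤ k → ¬ e ∣ k) ↔ Nat.Prime k.toNat := by
  constructor
  · intro h
    rw [Nat.prime_def_le_sqrt]
    refine ⟨by omega, fun m hm hms hdvd => ?_⟩
    have h2 : m * m ≤ k.toNat := Nat.le_sqrt.mp hms
    have hmm : (m : Int) * m ≤ k := by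
      have := Int.ofNat_le.mpr h2
      push_cast at this
      omega
    have hdvd' : (m : Int) ∣ k := by
      have := Int.natCast_dvd_natCast.mpr hdvd
      rwa [Int.toNat_of_nonneg (by omega : (0:Int) ≤ k)] at this
    exact h m (by exact_mod_cast hm) hmm hdvd'
  · intro hp e he hek hdvd
    have hdvd' : e.toNat ∣ k.toNat := by
      have h1 : ((e.toNat : Int)) ∣ ((k.toNat : Int)) := by
        rw [Int.toNat_of_nonneg (by omega : (0:Int) ≤ e),
            Int.toNat_of_nonneg (by omega : (0:Int) ≤ k)]
        exact hdvd
      exact_mod_cast h1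
    rcases hp.eq_one_or_self_of_dvd e.toNat hdvd' with h1 | h1
    · omega
    · have hek' : e = k := by omega
      nlinarith

-- 'no divisor j < x' characterises primality
theorem pvNoDivLt_iff (x : Int) (hx : 2 ≤ x) :
    (∀ j : Int, 2 ≤ j → j < x → ¬ j ∣ x) ↔ Nat.Prime x.toNat := by
  constructor
  · intro h
    rw [Nat.prime_def_lt']
    refine ⟨by omega, fun m hm hmx hdvd => ?_⟩
    have hdvd' : (m : Int) ∣ x := by
      have := Int.natCast_dvd_natCast.mpr hdvd
      rwa [Int.toNat_of_nonneg (by omega : (0:Int) ≤ x)] at this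
    exact h m (by exact_mod_cast hm) (by omega) hdvd'
  · intro hp j hj hjx hdvd
    have hdvd' : j.toNat ∣ x.toNat := by
      have h1 : ((j.toNat : Int)) ∣ ((x.toNat : Int)) := by
        rw [Int.toNat_of_nonneg (by omega : (0:Int) ≤ j),
            Int.toNat_of_nonneg (by omega : (0:Int) ≤ x)]
        exact hdvd
      exact_mod_cast h1
    rcases hp.eq_one_or_self_of_dvd j.toNat hdvd' with h1 | h1
    · omega
    · omega

theorem is_prime_iff (k : Int) : is_prime k = true ↔ 2 ≤ k ∧ Nat.Prime k.toNat := by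
  unfold is_prime
  by_cases hk : k < 2
  · rw [if_pos hk]
    constructor
    · intro h; simp at h
    · rintro ⟨h2, -⟩; omega
  · rw [if_neg hk]
    rw [not_lt] at hk
    rw [ipLoop_iff k 2 le_rfl, ← pvNoDivSq_iff k hk]
    constructor
    · intro h
      refine ⟨hk, fun e he hek hdvd => ?_⟩
      apply h e he hek
      rw [PySem.Int.mod_eq_emod_of_pos (by omega : (0:Int) < e)]
      exact Int.emod_eq_zero_of_dvd hdvd
    · rintro ⟨-, h⟩ e he hek h0
      apply h e he hek
      rw [PySem.Int.mod_eq_emod_of_pos (by omega : (0:Int) < e)] at h0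
      exact Int.dvd_of_emod_eq_zero h0

theorem opLoop_iff (n p : Int) (hp : 3 ≤ p) :
    opLoop n p = true ↔ ∃ e, p ≤ e ∧ e * e ≤ n ∧ PySem.Int.mod n e = 0 ∧
      is_prime e = true ∧ is_prime (PySem.Int.floordiv n e) = true := by
  generalize hm : (n + 1 - p).toNat = m
  induction m generalizing p with
  | zero =>
    have hnp : n < p := by omega
    rw [opLoop, if_neg (by nlinarith)]
    refine iff_of_false (by simp) ?_
    rintro ⟨e, he, hee, -⟩
    nlinarith
  | succ m ih =>
    rw [opLoop]
    by_cases hpn : p * p ≤ n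
    · rw [if_pos hpn]
      by_cases hc : (PySem.Int.mod n p == 0 && is_prime p && is_prime (PySem.Int.floordiv n p)) = true
      · rw [if_pos hc]
        simp only [Bool.and_eq_true, beq_iff_eq] at hc
        exact iff_of_true rfl ⟨p, le_rfl, hpn, hc.1.1, hc.1.2, hc.2⟩
      · rw [if_neg hc]
        have hple : p ≤ n := pvSqLeImpLe p n hpn
        rw [ih (p + 1) (by omega) (by omega)]
        constructor
        · rintro ⟨e, he, rest⟩; exact ⟨e, by omega, rest⟩
        · rintro ⟨e, he, hee, h1, h2, h3⟩
          rcases eq_or_lt_of_le he with rfl | hlt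
          · exact absurd (by simp [h1, h2, h3]) hc
          · exact ⟨e, by omega, hee, h1, h2, h3⟩
    · rw [if_neg hpn]
      refine iff_of_false (by simp) ?_
      rintro ⟨e, he, hee, -⟩
      nlinarith

theorem solve_alt_iff (n : Int) : solve_alt n = true ↔ IsPP n := by
  unfold solve_alt
  rw [opLoop_iff n 3 le_rfl]
  constructor
  · rintro ⟨e, he, hee, hmod, hpe, hpq⟩
    have he0 : (0:Int) < e := by omega
    have hdvd : e ∣ n := by
      rw [PySem.Int.mod_eq_emod_of_pos he0] at hmod
      exact Int.dvd_of_emod_eq_zero hmod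
    have hq : PySem.Int.floordiv n e = n / e := PySem.Int.floordiv_eq_ediv_of_pos he0
    have hne : e * (n / e) = n := Int.mul_ediv_cancel' hdvd
    rw [hq] at hpq
    obtain ⟨hq2, hqprime⟩ := (is_prime_iff _).mp hpq
    obtain ⟨he2, heprime⟩ := (is_prime_iff _).mp hpe
    have h3q : 3 ≤ n / e := by nlinarith
    exact ⟨e, n / e, he, h3q, heprime, hqprime, hne⟩
  · rintro ⟨p, q, hp3, hq3, hpp, hqp, hpq⟩
    rcases le_total p q with hle | hle
    · refine ⟨p, hp3, by nlinarith, ?_, ?_, ?_⟩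
      · rw [PySem.Int.mod_eq_emod_of_pos (by omega : (0:Int) < p)]
        exact Int.emod_eq_zero_of_dvd ⟨q, hpq.symm⟩
      · exact (is_prime_iff p).mpr ⟨by omega, hpp⟩
      · rw [PySem.Int.floordiv_eq_ediv_of_pos (by omega : (0:Int) < p)]
        have hnp : n / p = q := by
          rw [← hpq]; exact Int.mul_ediv_cancel_left q (by omega)
        rw [hnp]; exact (is_prime_iff q).mpr ⟨by omega, hqp⟩
    · refine ⟨q, hq3, by nlinarith, ?_, ?_, ?_⟩
      · rw [PySem.Int.mod_eq_emod_of_pos (by omega : (0:Int) < q)]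
        exact Int.emod_eq_zero_of_dvd ⟨p, by rw [← hpq, mul_comm]⟩
      · exact (is_prime_iff q).mpr ⟨by omega, hqp⟩
      · rw [PySem.Int.floordiv_eq_ediv_of_pos (by omega : (0:Int) < q)]
        have hnq : n / q = p := by
          rw [← hpq, mul_comm]; exact Int.mul_ediv_cancel_left p (by omega)
        rw [hnq]; exact (is_prime_iff p).mpr ⟨by omega, hpp⟩

-- ---- A-side characterisation ----

theorem prime_gen_eq (s e : Int) :
    prime_gen s e = (PySem.List.pyRange s e 1).filter (fun i => decide (i > 1) && pgInner i) := by
  unfold prime_gen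
  have hbody : (fun (ans : List Int) (i : Int) =>
        if i > 1 then (if pgInner i then ans ++ [i] else ans) else ans)
      = fun ans i => if (decide (i > 1) && pgInner i) = true then ans ++ [i] else ans := by
    funext ans i
    by_cases h1 : i > 1 <;> by_cases h2 : pgInner i = true <;> simp [h1, h2]
  rw [hbody, PySem.List.foldl_append_if_eq_filter]
  simp

theorem pgInner_iff (x : Int) (hx : 2 ≤ x) : pgInner x = true ↔ Nat.Prime x.toNat := by
  rw [← pvNoDivLt_iff x hx]
  unfold pgInner
  rw [List.all_eq_true]
  constructor
  · intro h j hj hjx hdvd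
    have hm := h j (PySem.List.mem_pyRange_one.mpr ⟨hj, hjx⟩)
    simp only [Bool.not_eq_eq_eq_not, Bool.not_true, beq_eq_false_iff_ne, ne_eq] at hm
    apply hm
    rw [PySem.Int.mod_eq_emod_of_pos (by omega : (0:Int) < j)]
    exact Int.emod_eq_zero_of_dvd hdvd
  · intro h j hj
    obtain ⟨h2j, hjx⟩ := PySem.List.mem_pyRange_one.mp hj
    simp only [Bool.not_eq_eq_eq_not, Bool.not_true, beq_eq_false_iff_ne, ne_eq]
    intro h0
    apply h j h2j hjx
    rw [PySem.Int.mod_eq_emod_of_pos (by omega : (0:Int) < j)] at h0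
    exact Int.dvd_of_emod_eq_zero h0

theorem mem_prime_gen (n x : Int) :
    x ∈ prime_gen 0 n ↔ 2 ≤ x ∧ x < n ∧ Nat.Prime x.toNat := by
  rw [prime_gen_eq, List.mem_filter, PySem.List.mem_pyRange_one]
  constructor
  · rintro ⟨⟨h0, hxn⟩, hpred⟩
    simp only [Bool.and_eq_true, decide_eq_true_eq] at hpred
    have hx2 : 2 ≤ x := by omega
    exact ⟨hx2, hxn, (pgInner_iff x hx2).mp hpred.2⟩
  · rintro ⟨hx2, hxn, hp⟩
    refine ⟨⟨by omega, hxn⟩, ?_⟩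
    simp only [Bool.and_eq_true, decide_eq_true_eq]
    exact ⟨by omega, (pgInner_iff x hx2).mpr hp⟩

-- the elements the double loop can reach (indices ≥ 1) are the odd primes in [3, n)
theorem drop1_mem (n x : Int) :
    x ∈ (prime_gen 0 n).drop 1 ↔ 3 ≤ x ∧ x < n ∧ Nat.Prime x.toNat := by
  by_cases hn : 3 ≤ n
  · have p2 : (decide ((2:Int) > 1) && pgInner 2) = true := by decide
    have hsplit : prime_gen 0 n
        = 2 :: (PySem.List.pyRange 3 n 1).filter (fun i => decide (i > 1) && pgInner i) := by
      have hr : PySem.List.pyRange 0 n 1 = 0 :: 1 :: 2 :: PySem.List.pyRange 3 n 1 := by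
        rw [PySem.List.pyRange_one_cons (by omega : (0:Int) < n),
            show (0:Int) + 1 = 1 from by norm_num,
            PySem.List.pyRange_one_cons (by omega : (1:Int) < n),
            show (1:Int) + 1 = 2 from by norm_num,
            PySem.List.pyRange_one_cons (by omega : (2:Int) < n),
            show (2:Int) + 1 = 3 from by norm_num]
      rw [prime_gen_eq, hr,
          List.filter_cons_of_neg (by simp), List.filter_cons_of_neg (by simp),
          List.filter_cons_of_pos (by exact p2)]
    rw [hsplit]
    simp only [List.drop_succ_cons, List.drop_zero]
    rw [List.mem_filter, PySem.List.mem_pyRange_one]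
    constructor
    · rintro ⟨⟨h3, hxn⟩, hpred⟩
      simp only [Bool.and_eq_true, decide_eq_true_eq] at hpred
      exact ⟨h3, hxn, (pgInner_iff x (by omega)).mp hpred.2⟩
    · rintro ⟨h3, hxn, hp⟩
      refine ⟨⟨h3, hxn⟩, ?_⟩
      simp only [Bool.and_eq_true, decide_eq_true_eq]
      exact ⟨by omega, (pgInner_iff x (by omega)).mpr hp⟩
  · have hnil : prime_gen 0 n = [] := by
      rw [List.eq_nil_iff_forall_not_mem]
      intro y hy
      obtain ⟨h2, hyn, -⟩ := (mem_prime_gen n y).mp hy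
      omega
    rw [hnil]
    constructor
    · intro h; simp at h
    · rintro ⟨h1, h2, -⟩; omega

theorem solve_iff (n : Int) : solve n = true ↔ IsPP n := by
  have key : ∀ (a : List Int),
      ((PySem.List.pyRange 1 (a.length : Int) 1).any (fun i =>
        (PySem.List.pyRange 1 (a.length : Int) 1).any (fun j =>
          PySem.List.pyGetD a i 0 * PySem.List.pyGetD a j 0 == n)))
      = (a.drop 1).any (fun x => (a.drop 1).any (fun y => x * y == n)) := by
    intro a
    have h1 : (PySem.List.pyRange 1 (a.length : Int) 1).map (fun j => PySem.List.pyGetD a j 0)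
        = a.drop 1 := by
      simpa using PySem.List.map_pyGetD_pyRange' a 0 (a := 1) (by omega)
    have h2 : ∀ (g : Int → Bool),
        (PySem.List.pyRange 1 (a.length : Int) 1).any (fun i => g (PySem.List.pyGetD a i 0))
        = (a.drop 1).any g := by
      intro g
      rw [← h1, List.any_map]
      rfl
    rw [h2 (fun x => (PySem.List.pyRange 1 (a.length : Int) 1).any (fun j =>
          x * PySem.List.pyGetD a j 0 == n))]
    exact List.any_congr rfl (fun x => h2 (fun y => x * y == n))
  simp only [solve]
  rw [key (prime_gen 0 n), List.any_eq_true]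
  constructor
  · rintro ⟨x, hx, hinner⟩
    rw [List.any_eq_true] at hinner
    obtain ⟨y, hy, hxy⟩ := hinner
    obtain ⟨hx3, hxn, hxp⟩ := (drop1_mem n x).mp hx
    obtain ⟨hy3, hyn, hyp⟩ := (drop1_mem n y).mp hy
    exact ⟨x, y, hx3, hy3, hxp, hyp, beq_iff_eq.mp hxy⟩
  · rintro ⟨p, q, hp3, hq3, hpp, hqp, hpq⟩
    have hpn : p < n := by nlinarith
    have hqn : q < n := by nlinarith
    refine ⟨p, (drop1_mem n p).mpr ⟨hp3, hpn, hpp⟩, ?_⟩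
    rw [List.any_eq_true]
    exact ⟨q, (drop1_mem n q).mpr ⟨hq3, hqn, hqp⟩, beq_iff_eq.mpr hpq⟩

-- ===== VERDICT (by name: the statement is the Claim_ definition above) =====
theorem solve_spec : Claim_equal_solve := by
  intro n _
  unfold Spec_solve
  by_cases h : solve_alt n = true
  · rw [h, (solve_iff n).2 ((solve_alt_iff n).1 h)]
  · rw [Bool.not_eq_true] at h
    by_cases h2 : solve n = true
    · exact absurd ((solve_alt_iff n).2 ((solve_iff n).1 h2)) (by simp [h])
    · rw [Bool.not_eq_true] at h2
      rw [h, h2]
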